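-- pv_equiv track=rewrite | github.com/Darkhunter9/python | Can Balance.py | can_balance
-- ===== SOURCE A (Python) =====
-- from typing import Iterable
--
-- def can_balance(weights: Iterable) -> int:
--     pos = len(weights)//2
--     distance = [abs(i-pos) for i in range(len(weights))]
--     record = set()
--
--     while 0 <= pos < len(weights):
--         left = sum([i[0]*i[1] for i in zip(weights[:pos],distance[:pos])])
--         right = sum([i[0]*i[1] for i in zip(weights[pos+1:],distance[pos+1:])])
--         if left == right:
--             return pos
--         elif left > right:
--             pos -= 1
--             record.add(-1)
--         else:
--             pos += 1
--             record.add(1)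
--         if len(record) > 1:
--             return -1
--         distance = [abs(i-pos) for i in range(len(weights))]
--     return -1
-- ===== SOURCE B (Python) =====
-- def can_balance(weights) -> int:
--     # closed form: pivot p balances iff p * total == moment, since
--     # left - right torque at p equals p*sum(w) - sum(i*w_i)
--     ws = list(weights)
--     n = len(ws)
--     total = sum(ws)
--     moment = sum(i * w for i, w in enumerate(ws))
--     if total == 0:
--         # every position balances when moment is also 0; pick the middle
--         return n // 2 if n > 0 and moment == 0 else -1
--     p, r = divmod(moment, total)
--     return p if r == 0 and 0 <= p < n else -1
-- ===== Notes on version B (the rewrite author's own statement) =====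
-- stated objective: faster
-- what changed: Replaced A's pivot walk, which recomputes both full torque sums at every step, by the closed form 'p balances iff p*sum(w) = sum(i*w_i)' computed from one pass over the list.
-- intended difference: On lists with negative total weight that have a balancing fulcrum (left and right torques equal) at some index other than the middle, A's greedy walk moves away from that fulcrum and returns -1, while B returns the fulcrum index, which is the intended answer. — e.g. on can_balance([-1, 0]): A returns -1, B returns 0
import Mathlib
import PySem

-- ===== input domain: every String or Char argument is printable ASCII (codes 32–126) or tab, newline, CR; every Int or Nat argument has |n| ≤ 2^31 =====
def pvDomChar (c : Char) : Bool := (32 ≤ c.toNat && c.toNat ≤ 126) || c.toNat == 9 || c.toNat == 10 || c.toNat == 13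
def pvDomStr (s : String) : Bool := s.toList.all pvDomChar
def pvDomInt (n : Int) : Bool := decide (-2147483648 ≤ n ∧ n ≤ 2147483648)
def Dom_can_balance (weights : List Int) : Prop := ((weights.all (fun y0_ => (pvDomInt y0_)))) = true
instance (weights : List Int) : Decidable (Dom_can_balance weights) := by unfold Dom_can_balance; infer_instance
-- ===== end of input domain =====

-- B replaces A's pivot walk (each step recomputing both torques from scratch) by the
-- closed form "p balances iff p*sum(w) = sum(i*w_i)", computed from one pass; on lists
-- with negative total weight A can walk the wrong way (see D_can_balance below).

-- ===== PORT A =====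
-- sum([i[0]*i[1] for i in zip(xs, ds)])
def pvTorque (xs ds : List Int) : Int := ((xs.zip ds).map (fun q => q.1 * q.2)).sum

-- distance = [abs(i-pos) for i in range(len(weights))]  (recomputed each iteration head)
def pvDist (n pos : Int) : List Int := (PySem.List.pyRange 0 n 1).map (fun i => |i - pos|)

def pvLeft (ws : List Int) (n pos : Int) : Int :=
  pvTorque (PySem.List.slice ws none (some pos)) (PySem.List.slice (pvDist n pos) none (some pos))

def pvRight (ws : List Int) (n pos : Int) : Int :=
  pvTorque (PySem.List.slice ws (some (pos + 1)) none) (PySem.List.slice (pvDist n pos) (some (pos + 1)) none)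

-- the while loop; Python recomputes `distance` at the end of each iteration from the new
-- pos, so at every loop head distance = pvDist n pos.  The loop moves pos by ±1 and
-- aborts one iteration after the direction first flips, so ws.length + 2 iterations
-- always suffice: the fuel never runs out (proved by the lemmas below).
def pvLoopA (ws : List Int) (n : Int) : Nat → Int → PySem.Set Int → Int
  | 0, _, _ => -1
  | fuel + 1, pos, record =>
    if 0 ≤ pos ∧ pos < n then
      let left := pvLeft ws n pos
      let right := pvRight ws n pos
      if left = right then pos
      else
        let pos' := if left > right then pos - 1 else pos + 1
        let record' := PySem.Set.add record (if left > right then (-1 : Int) else 1)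
        if 1 < PySem.List.len record' then -1
        else pvLoopA ws n fuel pos' record'
    else -1

def can_balance (weights : List Int) : Int :=
  pvLoopA weights (PySem.List.len weights) (weights.length + 2)
    (PySem.Int.floordiv (PySem.List.len weights) 2) PySem.Set.empty

-- ===== PORT B =====
-- moment = sum(i * w for i, w in enumerate(ws))
def pvMoment (ws : List Int) : Int := ((PySem.List.enumerate ws 0).map (fun q => q.1 * q.2)).sum

def can_balance_alt (weights : List Int) : Int :=
  let n : Int := PySem.List.len weights
  let total : Int := weights.sum
  let moment : Int := pvMoment weights
  if total = 0 then
    if 0 < n ∧ moment = 0 then PySem.Int.floordiv n 2 else -1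
  else
    -- p, r = divmod(moment, total); total ≠ 0 here, so divmod = (floordiv, mod)
    let p := PySem.Int.floordiv moment total
    let r := PySem.Int.mod moment total
    if r = 0 ∧ 0 ≤ p ∧ p < n then p else -1

-- ===== PRECONDITION & SPEC =====
-- the signed torque of the input about index p: Σ_i w_i·(p−i); it vanishes exactly when
-- the left and right torques about p are equal (used only to state D_can_balance; no port uses it)
def pvTorqueAbout (ws : List Int) (p : Nat) : Int :=
  ((List.range ws.length).map (fun i => ws.getD i 0 * ((p : Int) - (i : Int)))).sum

-- On lists with negative total weight that have a balancing fulcrum (left and right torques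
-- equal) at some index other than the middle, A's greedy walk moves away from that fulcrum
-- and returns -1, while B returns the fulcrum index, which is the intended answer.
def D_can_balance (weights : List Int) : Prop :=
  weights.sum < 0 ∧
    ∃ p < weights.length, p ≠ weights.length / 2 ∧ pvTorqueAbout weights p = 0
instance (weights : List Int) : Decidable (D_can_balance weights) := by
  unfold D_can_balance; infer_instance

def Spec_can_balance (weights : List Int) (out : Int) : Prop :=
  ¬ D_can_balance weights → out = can_balance_alt weights
instance (weights : List Int) (out : Int) : Decidable (Spec_can_balance weights out) := by
  unfold Spec_can_balance; infer_instance

def pvDiffWitness_can_balance : List Int := [-1, 0]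
def pvDiffWitnessOut_can_balance : Int × Int := (-1, 0)

-- ===== CLAIM (what is proved, stated in full; the proofs are below) =====
def Claim_unchanged_can_balance : Prop :=
  ∀ (weights : List Int), Dom_can_balance weights → Spec_can_balance weights (can_balance weights)
def Claim_changed_can_balance : Prop :=
  Dom_can_balance (pvDiffWitness_can_balance) ∧ D_can_balance (pvDiffWitness_can_balance) ∧
  can_balance (pvDiffWitness_can_balance) = pvDiffWitnessOut_can_balance.1 ∧
  can_balance_alt (pvDiffWitness_can_balance) = pvDiffWitnessOut_can_balance.2 ∧
  pvDiffWitnessOut_can_balance.1 ≠ pvDiffWitnessOut_can_balance.2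
def Claim_exact_can_balance : Prop :=
  ∀ (weights : List Int), Dom_can_balance weights → D_can_balance weights →
    can_balance weights ≠ can_balance_alt weights

-- ===== LEMMAS AND PROOFS =====

-- Σ w_k * f k over a list with its index
def pvMsum : List Int → (Nat → Int) → Int
  | [], _ => 0
  | w :: ws, f => w * f 0 + pvMsum ws (fun k => f (k + 1))

lemma pvMsum_congr (xs : List Int) (f g : Nat → Int) (h : ∀ k, k < xs.length → f k = g k) :
    pvMsum xs f = pvMsum xs g := by
  induction xs generalizing f g with
  | nil => rfl
  | cons w ws ih =>
    simp only [pvMsum]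
    rw [h 0 (by simp), ih (fun k => f (k+1)) (fun k => g (k+1))
      (fun k hk => h (k+1) (by simpa using Nat.succ_lt_succ hk))]

lemma pvMsum_linear (xs : List Int) (a b : Int) :
    pvMsum xs (fun k => a + b * k) = a * xs.sum + b * pvMsum xs (fun k => (k : Int)) := by
  induction xs generalizing a b with
  | nil => simp [pvMsum]
  | cons w ws ih =>
    simp only [pvMsum, List.sum_cons]
    have h1 : pvMsum ws (fun k => a + b * ((k + 1 : Nat) : Int)) =
        pvMsum ws (fun k => (a + b) + b * k) := by
      apply pvMsum_congr; intro k _; push_cast; ring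
    have h2 : pvMsum ws (fun k => ((k + 1 : Nat) : Int)) =
        pvMsum ws (fun k => 1 + 1 * k) := by
      apply pvMsum_congr; intro k _; push_cast; ring
    rw [h1, ih, h2, ih]; ring

lemma pvMsum_torque (xs : List Int) (f : Nat → Int) :
    pvTorque xs ((List.range xs.length).map (fun k => f k)) = pvMsum xs f := by
  induction xs generalizing f with
  | nil => rfl
  | cons w ws ih =>
    simp only [pvTorque, List.length_cons, List.range_succ_eq_map, List.map_cons,
      List.map_map, List.zip_cons_cons, List.sum_cons] at *
    have := ih (fun k => f (k + 1))
    rw [show ((List.map (f ∘ Nat.succ) (List.range ws.length))) =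
      (List.map (fun k => f (k+1)) (List.range ws.length)) from rfl, this]
    rfl

lemma pvMsum_append (xs ys : List Int) (f : Nat → Int) :
    pvMsum (xs ++ ys) f = pvMsum xs f + pvMsum ys (fun k => f (xs.length + k)) := by
  induction xs generalizing f with
  | nil => simp [pvMsum]
  | cons w ws ih =>
    simp only [List.cons_append, pvMsum, List.length_cons, ih]
    have : pvMsum ys (fun k => f (ws.length + k + 1)) =
        pvMsum ys (fun k => f (ws.length + 1 + k)) := by
      apply pvMsum_congr; intro k _; congr 1; omega
    rw [this]; ring

-- the moment of a list
def pvMom (xs : List Int) : Int := pvMsum xs (fun k => (k : Int))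

lemma pvMoment_eq_mom (ws : List Int) : pvMoment ws = pvMom ws := by
  suffices h : ∀ (xs : List Int) (s : Int),
      ((PySem.List.enumerate xs s).map (fun q => q.1 * q.2)).sum = pvMsum xs (fun k => s + k) by
    simpa [pvMoment, pvMom] using (h ws 0).trans (pvMsum_congr ws _ _ (by intro k _; simp))
  intro xs
  induction xs with
  | nil => intro s; rfl
  | cons w ws ih =>
    intro s
    simp only [PySem.List.enumerate_cons, List.map_cons, List.sum_cons, pvMsum, ih]
    have : pvMsum ws (fun k => (s + 1) + k) = pvMsum ws (fun k => s + ((k : Nat) + 1 : Nat)) := by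
      apply pvMsum_congr; intro k _; push_cast; ring
    rw [this]; ring

-- the getD-indexed sum over range n coincides with pvMsum
lemma pvRangeSum_msum (ws : List Int) (f : Nat → Int) :
    ((List.range ws.length).map (fun i => ws.getD i 0 * f i)).sum = pvMsum ws f := by
  induction ws generalizing f with
  | nil => rfl
  | cons w t ih =>
    simp only [List.length_cons, List.range_succ_eq_map, List.map_cons, List.map_map,
      List.sum_cons, List.getD_cons_zero, pvMsum]
    rw [← ih (fun k => f (k + 1))]
    have hmap : (List.range t.length).map ((fun i => (w :: t).getD i 0 * f i) ∘ Nat.succ) =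
        (List.range t.length).map (fun i => t.getD i 0 * f (i + 1)) := by
      apply List.map_congr_left
      intro k _
      simp [Function.comp]
    rw [hmap]

-- the D_-side torque is exactly p*S − T
lemma pvTorqueAbout_eq (ws : List Int) (p : Nat) :
    pvTorqueAbout ws p = (p : Int) * ws.sum - pvMom ws := by
  rw [pvTorqueAbout, pvRangeSum_msum]
  have h : pvMsum ws (fun i => (p : Int) - (i : Int)) =
      pvMsum ws (fun k => (p : Int) + (-1) * k) := by
    apply pvMsum_congr; intro k _; ring
  rw [h, pvMsum_linear, ← pvMom]; ring

lemma pvLeft_eq (ws : List Int) (pos : Int) (h0 : 0 ≤ pos) (h1 : pos < (ws.length : Int)) :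
    pvLeft ws (ws.length : Int) pos =
      pos * (ws.take pos.toNat).sum - pvMom (ws.take pos.toNat) := by
  set p := pos.toNat with hp
  have hpn : p ≤ ws.length := by omega
  have hlen : (ws.take p).length = p := by simp [hpn]
  have hslice_w : PySem.List.slice ws none (some pos) = ws.take p :=
    PySem.List.slice_to _ h0
  have hslice_d : PySem.List.slice (pvDist (ws.length : Int) pos) none (some pos) =
      (List.range p).map ((fun i => |i - pos|) ∘ (fun k : Nat => (k : Int))) := by
    rw [PySem.List.slice_to _ h0, pvDist, PySem.List.pyRange_zero_nat, List.map_map,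
      ← List.map_take, List.take_range, Nat.min_eq_left hpn]
  have ht := pvMsum_torque (ws.take p) ((fun i => |i - pos|) ∘ (fun k : Nat => (k : Int)))
  rw [hlen] at ht
  rw [pvLeft, hslice_w, hslice_d, ht]
  have hc : pvMsum (ws.take p) ((fun i => |i - pos|) ∘ (fun k : Nat => (k : Int))) =
      pvMsum (ws.take p) (fun k => pos + (-1) * k) := by
    apply pvMsum_congr
    intro k hk
    rw [hlen] at hk
    simp only [Function.comp_apply]
    rw [abs_of_nonpos (by omega)]
    ring
  rw [hc, pvMsum_linear,
    show pvMsum (ws.take p) (fun k => (k : Int)) = pvMom (ws.take p) from rfl]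
  ring

lemma pvRight_eq (ws : List Int) (pos : Int) (h0 : 0 ≤ pos) (h1 : pos < (ws.length : Int)) :
    pvRight ws (ws.length : Int) pos =
      (ws.drop (pos.toNat + 1)).sum + pvMom (ws.drop (pos.toNat + 1)) := by
  set p := pos.toNat with hp
  have hpn : p + 1 ≤ ws.length := by omega
  have h0' : (0 : Int) ≤ pos + 1 := by omega
  have htn : (pos + 1).toNat = p + 1 := by omega
  have hlen : (ws.drop (p + 1)).length = ws.length - (p + 1) := by simp
  have hslice_w : PySem.List.slice ws (some (pos + 1)) none = ws.drop (p + 1) := by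
    rw [PySem.List.slice_from _ h0', htn]
  have hslice_d : PySem.List.slice (pvDist (ws.length : Int) pos) (some (pos + 1)) none =
      (List.range (ws.length - (p + 1))).map
        ((fun i => |i - pos|) ∘ (fun k : Nat => ((p + 1 + k : Nat) : Int))) := by
    rw [PySem.List.slice_from _ h0', pvDist, PySem.List.pyRange_zero_nat, List.map_map,
      htn, ← List.map_drop, List.range_eq_range', List.drop_range']
    simp only [Nat.zero_add, Nat.mul_one, List.range'_eq_map_range, List.map_map]
    apply List.map_congr_left
    intro k _
    simp only [Function.comp_apply]
  have ht := pvMsum_torque (ws.drop (p + 1))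
    ((fun i => |i - pos|) ∘ (fun k : Nat => ((p + 1 + k : Nat) : Int)))
  rw [hlen] at ht
  rw [pvRight, hslice_w, hslice_d, ht]
  have hc : pvMsum (ws.drop (p + 1))
        ((fun i => |i - pos|) ∘ (fun k : Nat => ((p + 1 + k : Nat) : Int))) =
      pvMsum (ws.drop (p + 1)) (fun k => 1 + 1 * k) := by
    apply pvMsum_congr
    intro k _
    simp only [Function.comp_apply]
    rw [abs_of_nonneg (by push_cast; omega)]
    push_cast
    omega
  rw [hc, pvMsum_linear,
    show pvMsum (ws.drop (p + 1)) (fun k => (k : Int)) = pvMom (ws.drop (p + 1)) from rfl]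
  ring

-- the key torque identity: left - right = pos * S - T
lemma pvDiff_eq (ws : List Int) (pos : Int) (h0 : 0 ≤ pos) (h1 : pos < (ws.length : Int)) :
    pvLeft ws (ws.length : Int) pos - pvRight ws (ws.length : Int) pos =
      pos * ws.sum - pvMom ws := by
  set p := pos.toNat with hp
  have hpl : p < ws.length := by omega
  have hsplit : ws = ws.take p ++ ws[p] :: ws.drop (p + 1) := by
    conv_lhs => rw [← List.take_append_drop p ws]
    rw [← List.getElem_cons_drop hpl]
  have hlen : (ws.take p).length = p := by simp [Nat.le_of_lt hpl]
  have hS : ws.sum = (ws.take p).sum + ws[p] + (ws.drop (p+1)).sum := by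
    conv_lhs => rw [hsplit]
    rw [List.sum_append, List.sum_cons]
    ring
  have hT : pvMom ws = pvMom (ws.take p) + p * ws[p]
      + ((p:Int) + 1) * (ws.drop (p+1)).sum + pvMom (ws.drop (p+1)) := by
    conv_lhs => rw [pvMom, hsplit, pvMsum_append, hlen]
    simp only [pvMsum]
    have : pvMsum (ws.drop (p+1)) (fun k => ((p + (k + 1) : Nat) : Int)) =
        pvMsum (ws.drop (p+1)) (fun k => ((p:Int) + 1) + 1 * k) := by
      apply pvMsum_congr; intro k _; push_cast; ring
    rw [this, pvMsum_linear, ← pvMom]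
    push_cast [pvMom]; ring
  rw [pvLeft_eq ws pos h0 h1, pvRight_eq ws pos h0 h1, hS, hT, ← hp]
  have hpos : pos = (p : Int) := by omega
  rw [hpos]; ring

-- step-unfolding of the loop (the lets zeta-reduce)
lemma pvLoopA_succ (ws : List Int) (n : Int) (fuel : Nat) (pos : Int) (record : PySem.Set Int) :
    pvLoopA ws n (fuel + 1) pos record =
      if 0 ≤ pos ∧ pos < n then
        if pvLeft ws n pos = pvRight ws n pos then pos
        else
          if 1 < PySem.List.len (PySem.Set.add record
              (if pvLeft ws n pos > pvRight ws n pos then (-1 : Int) else 1)) then -1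
          else pvLoopA ws n fuel
            (if pvLeft ws n pos > pvRight ws n pos then pos - 1 else pos + 1)
            (PySem.Set.add record (if pvLeft ws n pos > pvRight ws n pos then (-1 : Int) else 1))
      else -1 := rfl

lemma pvSet_add_m1 : PySem.Set.add ([-1] : PySem.Set Int) (-1) = [-1] := by decide
lemma pvSet_add_m1_p1 : PySem.Set.add ([-1] : PySem.Set Int) 1 = [-1, 1] := by decide
lemma pvSet_add_p1 : PySem.Set.add ([1] : PySem.Set Int) 1 = [1] := by decide
lemma pvSet_add_p1_m1 : PySem.Set.add ([1] : PySem.Set Int) (-1) = [1, -1] := by decide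
lemma pvSet_add_empty (x : Int) : PySem.Set.add (PySem.Set.empty : PySem.Set Int) x = [x] := rfl

-- leftward run, non-positive total: the torque difference stays positive, A exits at -1
lemma pvRunL_nonpos (ws : List Int) (hS : ws.sum ≤ 0) :
    ∀ (fuel : Nat) (pos : Int), pos < (ws.length : Int) → (pos + 2).toNat ≤ fuel →
      0 < pos * ws.sum - pvMom ws →
      pvLoopA ws (ws.length : Int) fuel pos [-1] = -1 := by
  intro fuel
  induction fuel with
  | zero => intro pos _ _ _; rfl
  | succ fuel ih =>
    intro pos hpn hfuel hg
    rw [pvLoopA_succ]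
    by_cases h : 0 ≤ pos ∧ pos < (ws.length : Int)
    · rw [if_pos h]
      have hd := pvDiff_eq ws pos h.1 h.2
      have hne : pvLeft ws (ws.length : Int) pos ≠ pvRight ws (ws.length : Int) pos := by omega
      have hgt : pvLeft ws (ws.length : Int) pos > pvRight ws (ws.length : Int) pos := by omega
      rw [if_neg hne]
      simp only [if_pos hgt]
      rw [pvSet_add_m1]
      have hlen : ¬ (1 < PySem.List.len ([-1] : List Int)) := by decide
      rw [if_neg hlen]
      apply ih
      · omega
      · omega
      · have e : (pos - 1) * ws.sum - pvMom ws =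
            (pos * ws.sum - pvMom ws) - ws.sum := by ring
        rw [e]; omega
    · rw [if_neg h]

-- rightward run, non-positive total: the torque difference stays negative, A exits at -1
lemma pvRunR_nonpos (ws : List Int) (hS : ws.sum ≤ 0) :
    ∀ (fuel : Nat) (pos : Int), 0 ≤ pos → ((ws.length : Int) - pos + 1).toNat ≤ fuel →
      pos * ws.sum - pvMom ws < 0 →
      pvLoopA ws (ws.length : Int) fuel pos [1] = -1 := by
  intro fuel
  induction fuel with
  | zero => intro pos _ _ _; rfl
  | succ fuel ih =>
    intro pos hp0 hfuel hg
    rw [pvLoopA_succ]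
    by_cases h : 0 ≤ pos ∧ pos < (ws.length : Int)
    · rw [if_pos h]
      have hd := pvDiff_eq ws pos h.1 h.2
      have hne : pvLeft ws (ws.length : Int) pos ≠ pvRight ws (ws.length : Int) pos := by omega
      have hngt : ¬ (pvLeft ws (ws.length : Int) pos > pvRight ws (ws.length : Int) pos) := by omega
      rw [if_neg hne]
      simp only [if_neg hngt]
      rw [pvSet_add_p1]
      have hlen : ¬ (1 < PySem.List.len ([1] : List Int)) := by decide
      rw [if_neg hlen]
      apply ih
      · omega
      · omega
      · have e : (pos + 1) * ws.sum - pvMom ws =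
            (pos * ws.sum - pvMom ws) + ws.sum := by ring
        rw [e]; omega
    · rw [if_neg h]

-- leftward run, positive total, balancing pivot q at or below pos: A reaches q
lemma pvRunL_pos_found (ws : List Int) (hS : 0 < ws.sum) (q : Int)
    (hq : q * ws.sum = pvMom ws) (hq0 : 0 ≤ q) :
    ∀ (fuel : Nat) (pos : Int), pos < (ws.length : Int) → (pos + 2).toNat ≤ fuel →
      q ≤ pos → pvLoopA ws (ws.length : Int) fuel pos [-1] = q := by
  intro fuel
  induction fuel with
  | zero => intro pos _ hf hqp; omega
  | succ fuel ih =>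
    intro pos hpn hfuel hqp
    rw [pvLoopA_succ, if_pos ⟨by omega, hpn⟩]
    have hd := pvDiff_eq ws pos (by omega) hpn
    rcases eq_or_lt_of_le hqp with he | hlt
    · have h0 : pvLeft ws (ws.length : Int) pos = pvRight ws (ws.length : Int) pos := by
        have : pos * ws.sum - pvMom ws = 0 := by rw [← he, hq]; ring
        omega
      rw [if_pos h0, he]
    · have hgpos : 0 < pos * ws.sum - pvMom ws := by
        rw [← hq]
        have : 0 < (pos - q) * ws.sum := mul_pos (by omega) hS
        nlinarith
      have hne : pvLeft ws (ws.length : Int) pos ≠ pvRight ws (ws.length : Int) pos := by omega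
      have hgt : pvLeft ws (ws.length : Int) pos > pvRight ws (ws.length : Int) pos := by omega
      rw [if_neg hne]
      simp only [if_pos hgt]
      rw [pvSet_add_m1, if_neg (by decide : ¬ (1 < PySem.List.len ([-1] : List Int)))]
      exact ih (pos - 1) (by omega) (by omega) (by omega)

-- leftward run, positive total, no balancing pivot at or below the start: A exits at -1
lemma pvRunL_pos_none (ws : List Int) (_hS : 0 < ws.sum) :
    ∀ (fuel : Nat) (pos : Int), pos < (ws.length : Int) → (pos + 2).toNat ≤ fuel →
      (∀ x : Int, 0 ≤ x → x * ws.sum = pvMom ws → pos < x) →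
      pvLoopA ws (ws.length : Int) fuel pos [-1] = -1 := by
  intro fuel
  induction fuel with
  | zero => intro pos _ _ _; rfl
  | succ fuel ih =>
    intro pos hpn hfuel hnone
    rw [pvLoopA_succ]
    by_cases h : 0 ≤ pos ∧ pos < (ws.length : Int)
    · rw [if_pos h]
      have hd := pvDiff_eq ws pos h.1 h.2
      have hgne : pos * ws.sum - pvMom ws ≠ 0 := by
        intro h0
        have := hnone pos h.1 (by omega)
        omega
      have hne : pvLeft ws (ws.length : Int) pos ≠ pvRight ws (ws.length : Int) pos := by omega
      rw [if_neg hne]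
      by_cases hgt : pvLeft ws (ws.length : Int) pos > pvRight ws (ws.length : Int) pos
      · simp only [if_pos hgt]
        rw [pvSet_add_m1, if_neg (by decide : ¬ (1 < PySem.List.len ([-1] : List Int)))]
        exact ih (pos - 1) (by omega) (by omega) (fun x hx hxe => by
          have := hnone x hx hxe; omega)
      · simp only [if_neg hgt]
        rw [pvSet_add_m1_p1, if_pos (by decide : 1 < PySem.List.len ([-1, 1] : List Int))]
    · rw [if_neg h]

-- rightward run, positive total, balancing pivot q at or above pos (and in range): A reaches q
lemma pvRunR_pos_found (ws : List Int) (hS : 0 < ws.sum) (q : Int)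
    (hq : q * ws.sum = pvMom ws) (hqn : q < (ws.length : Int)) :
    ∀ (fuel : Nat) (pos : Int), 0 ≤ pos → ((ws.length : Int) - pos + 1).toNat ≤ fuel →
      pos ≤ q → pvLoopA ws (ws.length : Int) fuel pos [1] = q := by
  intro fuel
  induction fuel with
  | zero => intro pos _ hf hqp; omega
  | succ fuel ih =>
    intro pos hp0 hfuel hqp
    rw [pvLoopA_succ, if_pos ⟨hp0, by omega⟩]
    have hd := pvDiff_eq ws pos hp0 (by omega)
    rcases eq_or_lt_of_le hqp with he | hlt
    · have h0 : pvLeft ws (ws.length : Int) pos = pvRight ws (ws.length : Int) pos := by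
        have : pos * ws.sum - pvMom ws = 0 := by rw [he, hq]; ring
        omega
      rw [if_pos h0, he]
    · have hgneg : pos * ws.sum - pvMom ws < 0 := by
        rw [← hq]
        have : 0 < (q - pos) * ws.sum := mul_pos (by omega) hS
        nlinarith
      have hne : pvLeft ws (ws.length : Int) pos ≠ pvRight ws (ws.length : Int) pos := by omega
      have hngt : ¬ (pvLeft ws (ws.length : Int) pos > pvRight ws (ws.length : Int) pos) := by omega
      rw [if_neg hne]
      simp only [if_neg hngt]
      rw [pvSet_add_p1, if_neg (by decide : ¬ (1 < PySem.List.len ([1] : List Int)))]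
      exact ih (pos + 1) (by omega) (by omega) (by omega)

-- rightward run, positive total, no balancing pivot at or above the start: A exits at -1
lemma pvRunR_pos_none (ws : List Int) (_hS : 0 < ws.sum) :
    ∀ (fuel : Nat) (pos : Int), 0 ≤ pos → ((ws.length : Int) - pos + 1).toNat ≤ fuel →
      (∀ x : Int, x < (ws.length : Int) → x * ws.sum = pvMom ws → x < pos) →
      pvLoopA ws (ws.length : Int) fuel pos [1] = -1 := by
  intro fuel
  induction fuel with
  | zero => intro pos _ _ _; rfl
  | succ fuel ih =>
    intro pos hp0 hfuel hnone
    rw [pvLoopA_succ]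
    by_cases h : 0 ≤ pos ∧ pos < (ws.length : Int)
    · rw [if_pos h]
      have hd := pvDiff_eq ws pos h.1 h.2
      have hgne : pos * ws.sum - pvMom ws ≠ 0 := by
        intro h0
        have := hnone pos h.2 (by omega)
        omega
      have hne : pvLeft ws (ws.length : Int) pos ≠ pvRight ws (ws.length : Int) pos := by omega
      rw [if_neg hne]
      by_cases hgt : pvLeft ws (ws.length : Int) pos > pvRight ws (ws.length : Int) pos
      · simp only [if_pos hgt]
        rw [pvSet_add_p1_m1, if_pos (by decide : 1 < PySem.List.len ([1, -1] : List Int))]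
      · simp only [if_neg hgt]
        rw [pvSet_add_p1, if_neg (by decide : ¬ (1 < PySem.List.len ([1] : List Int)))]
        exact ih (pos + 1) (by omega) (by omega) (fun x hx hxe => by
          have := hnone x hx hxe; omega)
    · rw [if_neg h]

-- exact division facts for B's divmod
lemma pvFloordiv_exact (S T q : Int) (hS : S ≠ 0) (hq : q * S = T) :
    PySem.Int.mod T S = 0 ∧ PySem.Int.floordiv T S = q := by
  have hdvd : S ∣ T := ⟨q, by rw [← hq]; ring⟩
  have hm : PySem.Int.mod T S = 0 := (PySem.Int.mod_eq_zero_iff_dvd T S).2 hdvd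
  refine ⟨hm, ?_⟩
  have h1 := PySem.Int.floordiv_mul_add_mod T S
  rw [hm, add_zero] at h1
  exact mul_right_cancel₀ hS (h1.trans hq.symm)

lemma pvA_unfold (ws : List Int) :
    can_balance ws = pvLoopA ws (ws.length : Int) (ws.length + 2)
      (PySem.Int.floordiv (ws.length : Int) 2) PySem.Set.empty := by
  simp only [can_balance, PySem.List.len_eq]

lemma pvMid_bounds (ws : List Int) (hn : 0 < ws.length) :
    0 ≤ PySem.Int.floordiv (ws.length : Int) 2 ∧
      PySem.Int.floordiv (ws.length : Int) 2 < (ws.length : Int) := by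
  have h : PySem.Int.floordiv (ws.length : Int) 2 = ((ws.length / 2 : Nat) : Int) := by
    exact_mod_cast PySem.Int.floordiv_natCast ws.length 2
  rw [h]
  refine ⟨by positivity, ?_⟩
  exact_mod_cast Nat.div_lt_self hn (by norm_num)

lemma pvMid_natCast (ws : List Int) :
    PySem.Int.floordiv (ws.length : Int) 2 = ((ws.length / 2 : Nat) : Int) := by
  exact_mod_cast PySem.Int.floordiv_natCast ws.length 2

-- A's value when the middle already balances
lemma pvA_mid (ws : List Int) (hn : 0 < ws.length)
    (hg : PySem.Int.floordiv (ws.length : Int) 2 * ws.sum - pvMom ws = 0) :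
    can_balance ws = PySem.Int.floordiv (ws.length : Int) 2 := by
  obtain ⟨hb0, hb1⟩ := pvMid_bounds ws hn
  rw [pvA_unfold, show ws.length + 2 = (ws.length + 1) + 1 from rfl, pvLoopA_succ,
    if_pos ⟨hb0, hb1⟩]
  have hd := pvDiff_eq ws _ hb0 hb1
  rw [if_pos (by omega : pvLeft ws (ws.length : Int) (PySem.Int.floordiv (ws.length : Int) 2) =
    pvRight ws (ws.length : Int) (PySem.Int.floordiv (ws.length : Int) 2))]

-- A's value for non-positive total when the middle does not balance: -1
lemma pvA_nonpos_ne (ws : List Int) (hn : 0 < ws.length) (hS : ws.sum ≤ 0)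
    (hg : PySem.Int.floordiv (ws.length : Int) 2 * ws.sum - pvMom ws ≠ 0) :
    can_balance ws = -1 := by
  obtain ⟨hb0, hb1⟩ := pvMid_bounds ws hn
  rw [pvA_unfold, show ws.length + 2 = (ws.length + 1) + 1 from rfl, pvLoopA_succ,
    if_pos ⟨hb0, hb1⟩]
  have hd := pvDiff_eq ws _ hb0 hb1
  rw [if_neg (by omega : ¬ (pvLeft ws (ws.length : Int) (PySem.Int.floordiv (ws.length : Int) 2) =
    pvRight ws (ws.length : Int) (PySem.Int.floordiv (ws.length : Int) 2)))]
  by_cases hgt : pvLeft ws (ws.length : Int) (PySem.Int.floordiv (ws.length : Int) 2) >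
      pvRight ws (ws.length : Int) (PySem.Int.floordiv (ws.length : Int) 2)
  · simp only [if_pos hgt]
    rw [pvSet_add_empty, if_neg (by decide : ¬ (1 < PySem.List.len ([-1] : List Int)))]
    apply pvRunL_nonpos ws hS _ _ (by omega) (by omega)
    have e : (PySem.Int.floordiv (ws.length : Int) 2 - 1) * ws.sum - pvMom ws =
        (PySem.Int.floordiv (ws.length : Int) 2 * ws.sum - pvMom ws) - ws.sum := by ring
    rw [e]; omega
  · simp only [if_neg hgt]
    rw [pvSet_add_empty, if_neg (by decide : ¬ (1 < PySem.List.len ([1] : List Int)))]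
    apply pvRunR_nonpos ws hS _ _ (by omega) (by omega)
    have e : (PySem.Int.floordiv (ws.length : Int) 2 + 1) * ws.sum - pvMom ws =
        (PySem.Int.floordiv (ws.length : Int) 2 * ws.sum - pvMom ws) + ws.sum := by ring
    rw [e]; omega

-- A's value for positive total with a balancing pivot in range: that pivot
lemma pvA_pos_found (ws : List Int) (hS : 0 < ws.sum) (q : Int)
    (hq : q * ws.sum = pvMom ws) (h0 : 0 ≤ q) (h1 : q < (ws.length : Int)) :
    can_balance ws = q := by
  have hn : 0 < ws.length := by omega
  obtain ⟨hb0, hb1⟩ := pvMid_bounds ws hn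
  by_cases hqm : q = PySem.Int.floordiv (ws.length : Int) 2
  · rw [pvA_mid ws hn (by rw [← hqm, hq]; ring), hqm]
  · rw [pvA_unfold, show ws.length + 2 = (ws.length + 1) + 1 from rfl, pvLoopA_succ,
      if_pos ⟨hb0, hb1⟩]
    have hd := pvDiff_eq ws _ hb0 hb1
    rcases lt_or_gt_of_ne hqm with hlt | hgt
    · -- pivot strictly left of the middle: torque difference is positive
      have hgpos : 0 < PySem.Int.floordiv (ws.length : Int) 2 * ws.sum - pvMom ws := by
        rw [← hq]
        have : 0 < (PySem.Int.floordiv (ws.length : Int) 2 - q) * ws.sum :=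
          mul_pos (by omega) hS
        nlinarith
      rw [if_neg (by omega : ¬ (pvLeft ws (ws.length : Int)
          (PySem.Int.floordiv (ws.length : Int) 2) =
        pvRight ws (ws.length : Int) (PySem.Int.floordiv (ws.length : Int) 2))),
        ]
      simp only [if_pos (by omega : pvLeft ws (ws.length : Int)
          (PySem.Int.floordiv (ws.length : Int) 2) >
        pvRight ws (ws.length : Int) (PySem.Int.floordiv (ws.length : Int) 2))]
      rw [pvSet_add_empty, if_neg (by decide : ¬ (1 < PySem.List.len ([-1] : List Int)))]
      exact pvRunL_pos_found ws hS q hq h0 _ _ (by omega) (by omega) (by omega)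
    · -- pivot strictly right of the middle: torque difference is negative
      have hgneg : PySem.Int.floordiv (ws.length : Int) 2 * ws.sum - pvMom ws < 0 := by
        rw [← hq]
        have : 0 < (q - PySem.Int.floordiv (ws.length : Int) 2) * ws.sum :=
          mul_pos (by omega) hS
        nlinarith
      rw [if_neg (by omega : ¬ (pvLeft ws (ws.length : Int)
          (PySem.Int.floordiv (ws.length : Int) 2) =
        pvRight ws (ws.length : Int) (PySem.Int.floordiv (ws.length : Int) 2))),
        ]
      simp only [if_neg (by omega : ¬ (pvLeft ws (ws.length : Int)
          (PySem.Int.floordiv (ws.length : Int) 2) >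
        pvRight ws (ws.length : Int) (PySem.Int.floordiv (ws.length : Int) 2)))]
      rw [pvSet_add_empty, if_neg (by decide : ¬ (1 < PySem.List.len ([1] : List Int)))]
      exact pvRunR_pos_found ws hS q hq h1 _ _ (by omega) (by omega) (by omega)

-- A's value for positive total with no balancing pivot in range: -1
lemma pvA_pos_none (ws : List Int) (hn : 0 < ws.length) (hS : 0 < ws.sum)
    (hnp : ∀ x : Int, x * ws.sum = pvMom ws → ¬ (0 ≤ x ∧ x < (ws.length : Int))) :
    can_balance ws = -1 := by
  obtain ⟨hb0, hb1⟩ := pvMid_bounds ws hn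
  have hg : PySem.Int.floordiv (ws.length : Int) 2 * ws.sum - pvMom ws ≠ 0 := by
    intro h
    exact hnp _ (by omega) ⟨hb0, hb1⟩
  rw [pvA_unfold, show ws.length + 2 = (ws.length + 1) + 1 from rfl, pvLoopA_succ,
    if_pos ⟨hb0, hb1⟩]
  have hd := pvDiff_eq ws _ hb0 hb1
  rw [if_neg (by omega : ¬ (pvLeft ws (ws.length : Int)
      (PySem.Int.floordiv (ws.length : Int) 2) =
    pvRight ws (ws.length : Int) (PySem.Int.floordiv (ws.length : Int) 2)))]
  by_cases hgt : pvLeft ws (ws.length : Int) (PySem.Int.floordiv (ws.length : Int) 2) >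
      pvRight ws (ws.length : Int) (PySem.Int.floordiv (ws.length : Int) 2)
  · simp only [if_pos hgt]
    rw [pvSet_add_empty, if_neg (by decide : ¬ (1 < PySem.List.len ([-1] : List Int)))]
    apply pvRunL_pos_none ws hS _ _ (by omega) (by omega)
    intro x hx0 hxe
    have := hnp x hxe
    omega
  · simp only [if_neg hgt]
    rw [pvSet_add_empty, if_neg (by decide : ¬ (1 < PySem.List.len ([1] : List Int)))]
    apply pvRunR_pos_none ws hS _ _ (by omega) (by omega)
    intro x hxn hxe
    have := hnp x hxe
    omega

-- B's value when a balancing pivot exists in range (nonzero total)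
lemma pvAlt_pivot (ws : List Int) (hS : ws.sum ≠ 0) (q : Int)
    (hq : q * ws.sum = pvMom ws) (h0 : 0 ≤ q) (h1 : q < (ws.length : Int)) :
    can_balance_alt ws = q := by
  obtain ⟨hm, hf⟩ := pvFloordiv_exact ws.sum (pvMom ws) q hS hq
  simp only [can_balance_alt, PySem.List.len_eq, pvMoment_eq_mom]
  rw [if_neg hS, hm, hf, if_pos ⟨rfl, h0, h1⟩]

-- B's value when no balancing pivot exists in range (nonzero total): -1
lemma pvAlt_none (ws : List Int) (hS : ws.sum ≠ 0)
    (hnp : ∀ x : Int, x * ws.sum = pvMom ws → ¬ (0 ≤ x ∧ x < (ws.length : Int))) :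
    can_balance_alt ws = -1 := by
  simp only [can_balance_alt, PySem.List.len_eq, pvMoment_eq_mom]
  rw [if_neg hS]
  by_cases hm : PySem.Int.mod (pvMom ws) ws.sum = 0
  · have h1 := PySem.Int.floordiv_mul_add_mod (pvMom ws) ws.sum
    rw [hm, add_zero] at h1
    rw [if_neg]
    intro ⟨_, hr⟩
    exact hnp _ h1 hr
  · rw [if_neg (fun h => hm h.1)]

lemma pvAlt_zero_sum (ws : List Int) (hS : ws.sum = 0) :
    can_balance_alt ws = if 0 < (ws.length : Int) ∧ pvMom ws = 0
      then PySem.Int.floordiv (ws.length : Int) 2 else -1 := by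
  simp only [can_balance_alt, PySem.List.len_eq, pvMoment_eq_mom]
  rw [if_pos hS]

theorem pv_main (ws : List Int) (hnD : ¬ D_can_balance ws) :
    can_balance ws = can_balance_alt ws := by
  by_cases hn : ws.length = 0
  · rw [List.length_eq_zero_iff] at hn
    subst hn
    decide
  · have hn' : 0 < ws.length := Nat.pos_of_ne_zero hn
    by_cases hg0 : PySem.Int.floordiv (ws.length : Int) 2 * ws.sum - pvMom ws = 0
    · rw [pvA_mid ws hn' hg0]
      by_cases hS0 : ws.sum = 0
      · have hT0 : pvMom ws = 0 := by rw [hS0] at hg0; omega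
        rw [pvAlt_zero_sum ws hS0, if_pos ⟨by exact_mod_cast hn', hT0⟩]
      · exact (pvAlt_pivot ws hS0 _ (by omega) (pvMid_bounds ws hn').1
          (pvMid_bounds ws hn').2).symm
    · by_cases hSpos : 0 < ws.sum
      · by_cases hdvd : ws.sum ∣ pvMom ws
        · obtain ⟨c, hc⟩ := hdvd
          have hq : c * ws.sum = pvMom ws := by rw [hc]; ring
          by_cases hrange : 0 ≤ c ∧ c < (ws.length : Int)
          · rw [pvA_pos_found ws hSpos c hq hrange.1 hrange.2,
              pvAlt_pivot ws (by omega) c hq hrange.1 hrange.2]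
          · have hnp : ∀ x : Int, x * ws.sum = pvMom ws →
                ¬ (0 ≤ x ∧ x < (ws.length : Int)) := by
              intro x hx
              have : x = c := mul_right_cancel₀ (by omega) (hx.trans hq.symm)
              rw [this]; exact hrange
            rw [pvA_pos_none ws hn' hSpos hnp, pvAlt_none ws (by omega) hnp]
        · have hnp : ∀ x : Int, x * ws.sum = pvMom ws →
              ¬ (0 ≤ x ∧ x < (ws.length : Int)) := by
            intro x hx _
            exact hdvd ⟨x, by rw [← hx]; ring⟩
          rw [pvA_pos_none ws hn' hSpos hnp, pvAlt_none ws (by omega) hnp]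
      · have hS : ws.sum ≤ 0 := by omega
        rw [pvA_nonpos_ne ws hn' hS hg0]
        by_cases hS0 : ws.sum = 0
        · have hT0 : pvMom ws ≠ 0 := by rw [hS0] at hg0; omega
          rw [pvAlt_zero_sum ws hS0, if_neg (fun h => hT0 h.2)]
        · -- negative total: a balancing pivot in range would put the input inside D_
          refine (pvAlt_none ws hS0 ?_).symm
          intro x hx ⟨hx0, hxn⟩
          apply hnD
          refine ⟨by omega, x.toNat, by omega, ?_, ?_⟩
          · -- x ≠ the middle index, since the middle does not balance
            intro he
            apply hg0
            rw [pvMid_natCast, ← he, show ((x.toNat : Nat) : Int) = x from by omega, hx]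
            ring
          · rw [pvTorqueAbout_eq, show ((x.toNat : Nat) : Int) = x from by omega, hx]
            ring

-- ===== VERDICT (by name: the statement is the Claim_ definition above) =====
theorem can_balance_spec : Claim_unchanged_can_balance := by
  intro ws _ hnD
  exact pv_main ws hnD

theorem can_balance_changed : Claim_changed_can_balance := by
  unfold Claim_changed_can_balance; decide

theorem can_balance_tight : Claim_exact_can_balance := by
  intro ws _ hD
  obtain ⟨hSneg, p, hpn, hpne, ht⟩ := hD
  rw [pvTorqueAbout_eq] at ht
  have hS0 : ws.sum ≠ 0 := by omega
  have hq : (p : Int) * ws.sum = pvMom ws := by linarith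
  have hn' : 0 < ws.length := by omega
  have hqm : (p : Int) ≠ PySem.Int.floordiv (ws.length : Int) 2 := by
    rw [pvMid_natCast]
    intro he
    exact hpne (by omega)
  have hg : PySem.Int.floordiv (ws.length : Int) 2 * ws.sum - pvMom ws ≠ 0 := by
    intro h
    apply hqm
    have h2 : (p : Int) * ws.sum = PySem.Int.floordiv (ws.length : Int) 2 * ws.sum := by omega
    have := mul_right_cancel₀ hS0 h2
    omega
  rw [pvA_nonpos_ne ws hn' (by omega) hg,
    pvAlt_pivot ws hS0 (p : Int) hq (by positivity) (by exact_mod_cast hpn)]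
  omega
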